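-- pv_equiv track=rewrite | github.com/jhanvidattani25/repo2 | cosqa_corpus_part7.py | butlast
-- ===== SOURCE A (Python) =====
-- def butlast(iterable):
--     """Yield all items from ``iterable`` except the last one.
--
--     >>> list(butlast(['spam', 'eggs', 'ham']))
--     ['spam', 'eggs']
--
--     >>> list(butlast(['spam']))
--     []
--
--     >>> list(butlast([]))
--     []
--     """
--     iterable = iter(iterable)
--     try:
--         first = next(iterable)
--     except StopIteration:
--         return
--     for second in iterable:
--         yield first
--         first = second
-- ===== SOURCE B (Python) =====
-- def butlast(iterable):
--     """Yield all items from ``iterable`` except the last one."""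
--     items = list(iterable)
--     yield from items[:-1]
-- ===== Notes on version B (the rewrite author's own statement) =====
-- stated objective: simpler
-- what changed: Replaces the lazy one-element-lookahead generator loop with a two-stage approach: materialize the input into a list, then yield the slice items[:-1]; no held-previous state or pairwise shifting at all.
import Mathlib
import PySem

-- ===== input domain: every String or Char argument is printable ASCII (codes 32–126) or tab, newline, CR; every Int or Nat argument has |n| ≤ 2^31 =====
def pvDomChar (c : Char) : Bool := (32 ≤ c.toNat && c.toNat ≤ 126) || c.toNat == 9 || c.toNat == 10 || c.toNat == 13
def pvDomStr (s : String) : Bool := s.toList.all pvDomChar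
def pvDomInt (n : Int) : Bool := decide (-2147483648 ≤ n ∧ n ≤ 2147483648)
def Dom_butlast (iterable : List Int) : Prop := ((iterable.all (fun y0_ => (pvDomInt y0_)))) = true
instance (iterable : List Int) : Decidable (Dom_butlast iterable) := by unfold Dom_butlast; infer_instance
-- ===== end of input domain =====

-- B replaces A's lazy one-element-lookahead generator loop with a two-stage
-- materialize-then-slice approach (items[:-1]); same O(n) cost, plainer code.


-- ===== PORT A =====
-- A: take the first element; for each following 'second', yield the held 'first' and shift.
def butlastLoop (first : Int) : List Int → List Int
  | [] => []
  | second :: rest => first :: butlastLoop second rest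

def butlast (iterable : List Int) : List Int :=
  match iterable with
  | [] => []                       -- next(iterable) raises StopIteration → return
  | first :: rest => butlastLoop first rest

-- ===== PORT B =====
-- B: materialize the input, then yield the slice items[:-1].
def butlast_alt (iterable : List Int) : List Int :=
  PySem.List.slice iterable none (some (-1))

-- ===== PRECONDITION & SPEC =====
def Spec_butlast (iterable : List Int) (out : List Int) : Prop := out = butlast_alt iterable
instance (iterable : List Int) (out : List Int) : Decidable (Spec_butlast iterable out) := by unfold Spec_butlast; infer_instance

-- ===== CLAIM (what is proved, stated in full; the proofs are below) =====
def Claim_equal_butlast : Prop := ∀ (iterable : List Int), Dom_butlast iterable → Spec_butlast iterable (butlast iterable)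

-- ===== LEMMAS AND PROOFS =====
theorem butlastLoop_eq_dropLast (first : Int) (rest : List Int) :
    butlastLoop first rest = (first :: rest).dropLast := by
  induction rest generalizing first with
  | nil => rfl
  | cons second rest ih => simp [butlastLoop, ih second, List.dropLast_cons₂]

-- ===== VERDICT (by name: the statement is the Claim_ definition above) =====
theorem butlast_spec : Claim_equal_butlast := by
  intro iterable _
  unfold Spec_butlast butlast butlast_alt
  rw [PySem.List.slice_to_neg_one]
  cases iterable with
  | nil => rfl
  | cons first rest => exact butlastLoop_eq_dropLast first rest
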